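-- pv_equiv track=rewrite | github.com/Cz0210/Counterfactual-Subgraph | src/rewards/reward_wrapper.py | detect_obvious_parse_failure_detail
-- ===== SOURCE A (Python) =====
-- from collections import Counter
--
-- def _collect_ring_tokens_outside_brackets(smiles: str) -> list[str]:
--     tokens: list[str] = []
--     bracket_depth = 0
--     index = 0
--     text = str(smiles or "")
--     while index < len(text):
--         char = text[index]
--         if char == "[":
--             bracket_depth += 1
--             index += 1
--             continue
--         if char == "]":
--             bracket_depth = max(0, bracket_depth - 1)
--             index += 1
--             continue
--         if bracket_depth == 0:
--             if (
--                 char == "%"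
--                 and index + 2 < len(text)
--                 and text[index + 1 : index + 3].isdigit()
--             ):
--                 tokens.append(text[index : index + 3])
--                 index += 3
--                 continue
--             if char.isdigit():
--                 tokens.append(char)
--         index += 1
--     return tokens
--
-- def detect_obvious_parse_failure_detail(smiles: str) -> str | None:
--     """Return a coarse reason when the fragment likely failed due to missing closure."""
--
--     normalized = str(smiles or "").strip()
--     if not normalized:
--         return None
--     if normalized.count("(") != normalized.count(")"):
--         return "parse_failed_unbalanced_parentheses"
--     if normalized.count("[") != normalized.count("]"):
--         return "parse_failed_unbalanced_brackets"
--     ring_tokens = _collect_ring_tokens_outside_brackets(normalized)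
--     if any(count % 2 == 1 for count in Counter(ring_tokens).values()):
--         return "parse_failed_unclosed_ring"
--     return None
-- ===== SOURCE B (Python) =====
-- def detect_obvious_parse_failure_detail(smiles: str) -> str | None:
--     """Single fused pass: paren/bracket balances plus a toggle-set of ring tokens."""
--     text = str(smiles or "").strip()
--     if not text:
--         return None
--     paren = 0
--     bracket = 0
--     depth = 0
--     rings = set()
--     i = 0
--     n = len(text)
--     while i < n:
--         c = text[i]
--         if c == "(":
--             paren += 1
--         elif c == ")":
--             paren -= 1
--         elif c == "[":
--             bracket += 1
--             depth += 1
--         elif c == "]":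
--             bracket -= 1
--             depth = max(0, depth - 1)
--         elif depth == 0:
--             if c == "%" and i + 2 < n and text[i + 1].isdigit() and text[i + 2].isdigit():
--                 tok = text[i : i + 3]
--                 if tok in rings:
--                     rings.discard(tok)
--                 else:
--                     rings.add(tok)
--                 i += 3
--                 continue
--             if c.isdigit():
--                 if c in rings:
--                     rings.discard(c)
--                 else:
--                     rings.add(c)
--         i += 1
--     if paren != 0:
--         return "parse_failed_unbalanced_parentheses"
--     if bracket != 0:
--         return "parse_failed_unbalanced_brackets"
--     if rings:
--         return "parse_failed_unclosed_ring"
--     return None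
-- ===== Notes on version B (the rewrite author's own statement) =====
-- stated objective: alternative
-- what changed: B fuses A's two count() scans, the helper's token-collecting walk and the Counter parity test into one single pass that keeps paren/bracket balance counters and a toggle-set of ring tokens (a token is in the set at the end iff its count is odd).
import Mathlib
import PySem

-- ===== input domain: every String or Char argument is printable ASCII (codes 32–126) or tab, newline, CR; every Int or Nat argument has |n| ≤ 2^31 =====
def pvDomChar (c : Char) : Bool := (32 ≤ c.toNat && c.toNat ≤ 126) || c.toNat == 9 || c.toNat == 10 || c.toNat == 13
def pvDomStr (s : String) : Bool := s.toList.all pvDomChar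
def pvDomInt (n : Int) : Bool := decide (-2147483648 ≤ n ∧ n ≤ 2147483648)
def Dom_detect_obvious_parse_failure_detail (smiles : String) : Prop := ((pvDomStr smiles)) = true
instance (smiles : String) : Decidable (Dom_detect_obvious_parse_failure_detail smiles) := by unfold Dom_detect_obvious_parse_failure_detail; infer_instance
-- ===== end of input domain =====

-- B fuses A's separate passes (two count() scans, the token-collecting walk, the Counter
-- parity test) into one single pass with balance counters and a toggle-set of ring tokens.

-- ===== PORT A =====
-- _collect_ring_tokens_outside_brackets: the forward index walk becomes recursion on the
-- remaining characters; a Python token (substring of the ASCII input) is a List Char.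
-- The '%' case requires index+2 < len, i.e. at least two characters after '%'; when its
-- guard fails Python falls through to `char.isdigit()` ('%' is not a digit) and index += 1,
-- i.e. it continues with the rest of the list.
def pvCollectRing : List Char → Nat → List (List Char)
  | [], _ => []
  | '[' :: rest, d => pvCollectRing rest (d + 1)
  | ']' :: rest, d => pvCollectRing rest (d - 1)   -- max(0, d-1) = Nat subtraction
  | '%' :: a :: b :: rest', 0 =>
      if PySem.Chars.strIsdigit [a, b] then ['%', a, b] :: pvCollectRing rest' 0
      else pvCollectRing (a :: b :: rest') 0
  | c :: rest, d =>
      if d = 0 then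
        if PySem.Chars.isdigit c then [c] :: pvCollectRing rest 0 else pvCollectRing rest 0
      else pvCollectRing rest d

def detect_obvious_parse_failure_detail (smiles : String) : Option String :=
  let normalized := PySem.Chars.strip smiles.toList   -- str(smiles or "").strip()
  if normalized = [] then none
  else if PySem.Chars.count normalized ['('] ≠ PySem.Chars.count normalized [')'] then
    some "parse_failed_unbalanced_parentheses"
  else if PySem.Chars.count normalized ['['] ≠ PySem.Chars.count normalized [']'] then
    some "parse_failed_unbalanced_brackets"
  else
    let ringTokens := pvCollectRing normalized 0
    if (PySem.Dict.counter ringTokens).values.any (fun c => PySem.Int.mod c 2 == 1) then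
      some "parse_failed_unclosed_ring"
    else none

-- ===== PORT B =====
-- toggle: add the token if absent, discard it if present
def pvToggle (s : PySem.Set (List Char)) (t : List Char) : PySem.Set (List Char) :=
  if t ∈ s then PySem.Set.discard s t else PySem.Set.add s t

-- the fused single pass of Source B (forward index walk → recursion on the rest)
def pvWalk : List Char → Int → Int → Nat → PySem.Set (List Char) → Int × Int × PySem.Set (List Char)
  | [], p, b, _, s => (p, b, s)
  | '(' :: rest, p, b, d, s => pvWalk rest (p + 1) b d s
  | ')' :: rest, p, b, d, s => pvWalk rest (p - 1) b d s
  | '[' :: rest, p, b, d, s => pvWalk rest p (b + 1) (d + 1) s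
  | ']' :: rest, p, b, d, s => pvWalk rest p (b - 1) (d - 1) s
  | '%' :: a :: bc :: rest', p, b, 0, s =>
      if PySem.Chars.isdigit a && PySem.Chars.isdigit bc then
        pvWalk rest' p b 0 (pvToggle s ['%', a, bc])
      else pvWalk (a :: bc :: rest') p b 0 s
  | c :: rest, p, b, d, s =>
      if d = 0 then
        if PySem.Chars.isdigit c then pvWalk rest p b 0 (pvToggle s [c])
        else pvWalk rest p b 0 s
      else pvWalk rest p b d s

def detect_obvious_parse_failure_detail_alt (smiles : String) : Option String :=
  let text := PySem.Chars.strip smiles.toList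
  if text = [] then none
  else
    let r := pvWalk text 0 0 0 PySem.Set.empty
    if r.1 ≠ 0 then some "parse_failed_unbalanced_parentheses"
    else if r.2.1 ≠ 0 then some "parse_failed_unbalanced_brackets"
    else if r.2.2 ≠ [] then some "parse_failed_unclosed_ring"
    else none

-- ===== PRECONDITION & SPEC =====
def Spec_detect_obvious_parse_failure_detail (smiles : String) (out : Option String) : Prop := out = detect_obvious_parse_failure_detail_alt smiles
instance (smiles : String) (out : Option String) : Decidable (Spec_detect_obvious_parse_failure_detail smiles out) := by unfold Spec_detect_obvious_parse_failure_detail; infer_instance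

-- ===== CLAIM (what is proved, stated in full; the proofs are below) =====
def Claim_equal_detect_obvious_parse_failure_detail : Prop := ∀ (smiles : String), Dom_detect_obvious_parse_failure_detail smiles → Spec_detect_obvious_parse_failure_detail smiles (detect_obvious_parse_failure_detail smiles)

-- ===== LEMMAS AND PROOFS =====

-- Chars.count with a single-character needle is List.count
lemma pv_count_go_single (c : Char) :
    ∀ (l : List Char) (fuel acc : Nat), l.length ≤ fuel →
      PySem.Chars.count.go [c] fuel l acc = acc + l.count c := by
  intro l
  induction l with
  | nil =>
    intro fuel acc _
    cases fuel <;> simp [PySem.Chars.count.go]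
  | cons h t ih =>
    intro fuel acc hle
    cases fuel with
    | zero => simp at hle
    | succ n =>
      rw [PySem.Chars.count.go]
      by_cases hc : c = h
      · subst hc
        simp [List.isPrefixOf, ih n (acc + 1) (by simpa using hle)]
        omega
      · simp [List.isPrefixOf, hc, ih n acc (by simpa using hle), Ne.symm hc]

lemma pv_count_single (c : Char) (l : List Char) :
    PySem.Chars.count l [c] = l.count c := by
  simp [PySem.Chars.count, pv_count_go_single c l l.length 0 le_rfl]

-- pvToggle flips membership of its token and leaves everything else alone
lemma pv_mem_toggle (s : PySem.Set (List Char)) (t x : List Char) :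
    x ∈ pvToggle s t ↔ (if x = t then x ∉ s else x ∈ s) := by
  unfold pvToggle
  by_cases hx : x = t
  · subst hx
    split <;> rename_i hm
    · simp [PySem.Set.mem_discard, hm]
    · simp [hm]
  · split <;> rename_i hm
    · simp [PySem.Set.mem_discard, hx]
    · simp [PySem.Set.mem_add, hx]

-- toggle-fold parity invariant: x survives iff its membership flipped an odd number of times
lemma pv_mem_foldl_toggle (l : List (List Char)) :
    ∀ (s : PySem.Set (List Char)) (x : List Char),
      (x ∈ l.foldl pvToggle s ↔ ((x ∈ s) ↔ l.count x % 2 = 0)) := by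
  induction l with
  | nil => intro s x; simp
  | cons t rest ih =>
    intro s x
    rw [List.foldl_cons, ih (pvToggle s t) x, pv_mem_toggle, List.count_cons]
    by_cases hx : x = t
    · subst hx
      by_cases hs : x ∈ s <;> simp [hs] <;> omega
    · simp [hx, Ne.symm hx]

-- a digit is none of the special characters
lemma pv_isdigit_ne {c : Char} (h : PySem.Chars.isdigit c = true) :
    c ≠ '(' ∧ c ≠ ')' ∧ c ≠ '[' ∧ c ≠ ']' := by
  refine ⟨?_, ?_, ?_, ?_⟩ <;> rintro rfl <;> exact absurd h (by decide)

-- the fused walk = the two balance counts plus the toggle-fold over A's collected tokens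
lemma pv_walk_eq : ∀ (cs : List Char) (p b : Int) (d : Nat) (s : PySem.Set (List Char)),
      pvWalk cs p b d s =
        (p + cs.count '(' - cs.count ')',
         b + cs.count '[' - cs.count ']',
         (pvCollectRing cs d).foldl pvToggle s) := by
  intro cs p b d s
  induction cs, p, b, d, s using pvWalk.induct with
  | case1 p b x s => simp [pvWalk, pvCollectRing]
  | case2 rest p b d s ih =>
    simp_all [pvWalk, pvCollectRing]
    constructor
    · omega
    · split <;> rename_i hd
      · subst hd; rfl
      · rfl
  | case3 rest p b d s ih =>
    simp_all [pvWalk, pvCollectRing]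
    constructor
    · omega
    · split <;> rename_i hd
      · subst hd; rfl
      · rfl
  | case4 rest p b d s ih =>
    simp_all [pvWalk, pvCollectRing]
    omega
  | case5 rest p b d s ih =>
    simp_all [pvWalk, pvCollectRing]
    omega
  | case6 a bc rest' p b s hdig ih =>
    obtain ⟨ha, hbc⟩ := Bool.and_eq_true_iff.mp hdig
    obtain ⟨ha1, ha2, ha3, ha4⟩ := pv_isdigit_ne ha
    obtain ⟨hb1, hb2, hb3, hb4⟩ := pv_isdigit_ne hbc
    simp_all [pvWalk, pvCollectRing, PySem.Chars.strIsdigit]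
  | case7 a bc rest' p b s hdig ih =>
    have hff : ¬(PySem.Chars.isdigit a = true ∧ PySem.Chars.isdigit bc = true) := by
      intro hx; exact hdig (by simp [hx.1, hx.2])
    simp only [pvWalk, pvCollectRing, PySem.Chars.strIsdigit, List.isEmpty_cons, List.all_cons,
      List.all_nil, Bool.not_false, Bool.true_and, Bool.and_true, Bool.and_eq_true]
    rw [if_neg hff, if_neg hff]
    exact ih
  | case8 c rest p b s h1 h2 h3 h4 hdig hshape ih =>
    simp_all [pvWalk, pvCollectRing]
  | case9 c rest p b s h1 h2 h3 h4 hdig hshape ih =>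
    simp_all [pvWalk, pvCollectRing]
  | case10 c rest p b d s h1 h2 h3 h4 hshape hd ih =>
    simp_all [pvWalk, pvCollectRing]

-- A's Counter odd-parity test = B's toggle-set being nonempty
lemma pv_ring_iff (tokens : List (List Char)) :
    ((PySem.Dict.counter tokens).values.any (fun c => PySem.Int.mod c 2 == 1) = true) ↔
      tokens.foldl pvToggle PySem.Set.empty ≠ [] := by
  have hvals : (PySem.Dict.counter tokens).values
      = (PySem.Set.ofList tokens).map (fun k => ((tokens.count k : Int))) := by
    simp only [PySem.Dict.values, PySem.Dict.items_counter, List.map_map]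
    rfl
  rw [hvals]
  constructor
  · intro h
    rw [List.any_eq_true] at h
    obtain ⟨v, hv, hodd⟩ := h
    rw [List.mem_map] at hv
    obtain ⟨k, hk, rfl⟩ := hv
    have hodd' : tokens.count k % 2 = 1 := by
      have := of_decide_eq_true (by simpa using hodd)
      omega
    intro hnil
    have := (pv_mem_foldl_toggle tokens PySem.Set.empty k)
    rw [hnil] at this
    simp [PySem.Set.empty] at this
    omega
  · intro h
    obtain ⟨k, hk⟩ := List.exists_mem_of_ne_nil _ h
    have hmem := (pv_mem_foldl_toggle tokens PySem.Set.empty k).mp hk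
    simp [PySem.Set.empty] at hmem
    rw [List.any_eq_true]
    refine ⟨(tokens.count k : Int), List.mem_map.mpr ⟨k, ?_, rfl⟩, ?_⟩
    · exact (PySem.Set.mem_ofList _ _).mpr (List.count_pos_iff.mp (by omega))
    · simp
      omega

-- ===== VERDICT (by name: the statement is the Claim_ definition above) =====
theorem detect_obvious_parse_failure_detail_spec : Claim_equal_detect_obvious_parse_failure_detail := by
  intro smiles _
  unfold Spec_detect_obvious_parse_failure_detail
  unfold detect_obvious_parse_failure_detail detect_obvious_parse_failure_detail_alt
  simp only
  by_cases hnil : PySem.Chars.strip smiles.toList = []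
  · simp [hnil]
  · rw [if_neg hnil, if_neg hnil, pv_walk_eq]
    simp only [pv_count_single]
    by_cases hp : (PySem.Chars.strip smiles.toList).count '(' =
        (PySem.Chars.strip smiles.toList).count ')'
    · rw [if_neg (by simpa using hp), if_neg (show ¬(0 +
        ((PySem.Chars.strip smiles.toList).count '(' : Int) -
        (PySem.Chars.strip smiles.toList).count ')' ≠ 0) by omega)]
      by_cases hb : (PySem.Chars.strip smiles.toList).count '[' =
          (PySem.Chars.strip smiles.toList).count ']'
      · rw [if_neg (by simpa using hb), if_neg (show ¬(0 +
          ((PySem.Chars.strip smiles.toList).count '[' : Int) -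
          (PySem.Chars.strip smiles.toList).count ']' ≠ 0) by omega)]
        by_cases hr : (pvCollectRing (PySem.Chars.strip smiles.toList) 0).foldl pvToggle
            PySem.Set.empty = []
        · rw [if_neg (by rw [pv_ring_iff]; simpa using hr), if_neg (by simpa using hr)]
        · rw [if_pos (by rw [pv_ring_iff]; exact hr), if_pos hr]
      · rw [if_pos (by simpa using hb), if_pos (show (0 +
          ((PySem.Chars.strip smiles.toList).count '[' : Int) -
          (PySem.Chars.strip smiles.toList).count ']' ≠ 0) by omega)]
    · rw [if_pos (by simpa using hp), if_pos (show (0 +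
        ((PySem.Chars.strip smiles.toList).count '(' : Int) -
        (PySem.Chars.strip smiles.toList).count ')' ≠ 0) by omega)]
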